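-- pv_equiv track=rewrite | github.com/tkiet79/geeksforgeeks | geeksforgeeks_Frequencies in a Limited Array.py | frequencyCount
-- ===== SOURCE A (Python) =====
-- def frequencyCount(arr):
--     n = len(arr)
--     # Bước 1: Tạo Hash Map để đếm
--     # (Bạn có thể dùng thư viện collections.Counter cho nhanh, nhưng code tay cho dễ hiểu)
--     count_map = {}
--
--     for num in arr:
--         if num in count_map:
--             count_map[num] += 1
--         else:
--             count_map[num] = 1
--
--     # Bước 2: Sửa trực tiếp vào mảng arr (In-place) theo yêu cầu đề bài
--     # Duyệt từ index 0 đến n-1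
--     for i in range(n):
--         target_number = i + 1  # Index 0 thì tìm số 1, Index 1 tìm số 2...
--
--         if target_number in count_map:
--             arr[i] = count_map[target_number]
--         else:
--             arr[i] = 0 # Nếu số đó không xuất hiện thì ghi 0
--
--     # Lưu ý: Hàm này thường không yêu cầu return, mà sửa trực tiếp arr.
--     # Nhưng nếu cần in ra để test thì:
--     return arr
-- ===== SOURCE B (Python) =====
-- def frequencyCount(arr):
--     n = len(arr)
--     # Sort a copy, then sweep it once with the targets 1..n in lockstep
--     # (merge-style two-pointer): for each target, skip past smaller elements,
--     # then count the run of equal ones.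
--     s = sorted(arr)
--     out = []
--     j = 0
--     for target in range(1, n + 1):
--         while j < n and s[j] < target:
--             j += 1
--         c = 0
--         while j < n and s[j] == target:
--             c += 1
--             j += 1
--         out.append(c)
--     arr[:] = out
--     return arr
-- ===== Notes on version B (the rewrite author's own statement) =====
-- stated objective: alternative
-- what changed: Replaces hash-map counting plus a per-index lookup pass by sort-then-sweep: sort a copy of the array and walk it once in lockstep with the targets 1..n, discarding smaller elements and counting each run of equal elements (merge-style two-pointer), then copy the result back in place.
import Mathlib
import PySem

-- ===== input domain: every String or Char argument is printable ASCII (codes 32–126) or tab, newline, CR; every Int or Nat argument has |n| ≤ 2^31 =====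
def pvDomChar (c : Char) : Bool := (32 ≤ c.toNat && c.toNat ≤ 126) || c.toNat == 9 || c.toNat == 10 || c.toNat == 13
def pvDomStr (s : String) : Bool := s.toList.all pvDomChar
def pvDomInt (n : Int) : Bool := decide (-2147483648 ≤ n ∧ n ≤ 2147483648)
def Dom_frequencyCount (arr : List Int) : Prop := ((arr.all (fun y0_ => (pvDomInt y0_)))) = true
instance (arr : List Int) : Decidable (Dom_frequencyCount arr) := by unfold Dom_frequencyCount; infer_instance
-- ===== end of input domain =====

-- B replaces A's hash-map counting + per-index lookup pass by sort-then-sweep: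
-- sort a copy, then one pointer walks it in lockstep with the targets 1..n,
-- skipping smaller elements and counting each run of equal ones (merge-style).
-- Both Pythons mutate arr in place to the returned value; the equivalence
-- proved here is about the returned value.

-- ===== PORT A =====
-- counting loop: if num in count_map: count_map[num] += 1 else: count_map[num] = 1
def frequencyCountMap (arr : List Int) : PySem.Dict Int Int :=
  arr.foldl
    (fun d num =>
      if d.contains num then d.insert num (d.getD num 0 + 1)
      else d.insert num 1)
    PySem.Dict.empty

-- second loop: for i in range(n): arr[i] = count_map[i+1] if present else 0   (n = len(arr))
def frequencyCount (arr : List Int) : List Int :=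
  (List.range arr.length).foldl
    (fun (a : List Int) (i : Nat) =>
      if (frequencyCountMap arr).contains ((i : Int) + 1) then
        a.set i ((frequencyCountMap arr).getD ((i : Int) + 1) 0)
      else a.set i 0)
    arr

-- ===== PORT B =====
-- while j < n and s[j] < target: j += 1   (returns the advanced j; j < n = len(s) keeps s[j] in range)
def bSkip (s : List Int) (n : Nat) (t : Int) (j : Nat) : Nat :=
  if h : j < n ∧ s.getD j 0 < t then bSkip s n t (j + 1) else j
termination_by n - j
decreasing_by omega

-- c = 0; while j < n and s[j] == target: c += 1; j += 1   (returns c; the new j is j + c)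
def bCount (s : List Int) (n : Nat) (t : Int) (j : Nat) : Nat :=
  if h : j < n ∧ s.getD j 0 = t then bCount s n t (j + 1) + 1 else 0
termination_by n - j
decreasing_by omega

-- s = sorted(arr); j = 0; for target in range(1, n+1): skip, count run, append c
def frequencyCount_alt (arr : List Int) : List Int :=
  ((PySem.List.pyRange 1 ((arr.length : Int) + 1) 1).foldl
    (fun (st : Nat × List Int) (target : Int) =>
      let j := bSkip (PySem.List.sorted arr (fun x => x) false) arr.length target st.1
      let c := bCount (PySem.List.sorted arr (fun x => x) false) arr.length target j
      (j + c, st.2 ++ [(c : Int)]))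
    (0, [])).2

-- ===== PRECONDITION & SPEC =====
def Spec_frequencyCount (arr : List Int) (out : List Int) : Prop := out = frequencyCount_alt arr
instance (arr : List Int) (out : List Int) : Decidable (Spec_frequencyCount arr out) := by unfold Spec_frequencyCount; infer_instance

-- ===== CLAIM (what is proved, stated in full; the proofs are below) =====
def Claim_equal_frequencyCount : Prop := ∀ (arr : List Int), Dom_frequencyCount arr → Spec_frequencyCount arr (frequencyCount arr)

-- ===== LEMMAS AND PROOFS =====

-- A's branching counting step equals the plain insert-increment step, so the
-- dict holds exactly the multiplicities.
lemma frequencyCountMap_getD (arr : List Int) (v : Int) :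
    (frequencyCountMap arr).getD v 0 = arr.count v := by
  have hstep :
      (fun (d : PySem.Dict Int Int) (num : Int) =>
        if d.contains num then d.insert num (d.getD num 0 + 1)
        else d.insert num 1)
      = (fun (d : PySem.Dict Int Int) (num : Int) =>
        d.insert num (d.getD num 0 + 1)) := by
    funext d num
    by_cases h : d.contains num = true
    · simp [h]
    · have h0 : d.contains num = false := by revert h; cases d.contains num <;> simp
      rw [if_neg (by simp [h0]), PySem.Dict.getD_of_not_contains _ _ h0]
      norm_num
  unfold frequencyCountMap
  rw [hstep, PySem.Dict.getD_foldl_insert_add_one]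
  simp

-- A's write-every-index loop, for any write function f.
lemma foldl_range_set (f : Nat → Int) :
    ∀ (n : Nat) (a : List Int), n ≤ a.length →
      (List.range n).foldl (fun a i => a.set i (f i)) a
        = (List.range n).map f ++ a.drop n := by
  intro n
  induction n with
  | zero => intro a _; simp
  | succ m ih =>
    intro a hlen
    have hm : m ≤ a.length := by omega
    rw [List.range_succ, List.foldl_append, ih a hm]
    simp only [List.foldl_cons, List.foldl_nil]
    rw [List.set_append, if_neg (by simp)]
    have hidx : m - (List.map f (List.range m)).length = 0 := by simp
    rw [hidx, List.drop_eq_getElem_cons (show m < a.length by omega),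
      List.set_cons_zero, List.map_append]
    simp

lemma frequencyCount_eq_map (arr : List Int) :
    frequencyCount arr
      = (List.range arr.length).map (fun (i : Nat) => (arr.count ((i : Int) + 1) : Int)) := by
  unfold frequencyCount
  have hstep :
      (fun (a : List Int) (i : Nat) =>
        if (frequencyCountMap arr).contains ((i : Int) + 1) then
          a.set i ((frequencyCountMap arr).getD ((i : Int) + 1) 0)
        else a.set i 0)
      = (fun (a : List Int) (i : Nat) => a.set i ((arr.count ((i : Int) + 1) : Int))) := by
    funext a i
    by_cases h : (frequencyCountMap arr).contains ((i : Int) + 1) = true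
    · simp [h, frequencyCountMap_getD]
    · have h0 : (frequencyCountMap arr).contains ((i : Int) + 1) = false := by
        revert h; cases (frequencyCountMap arr).contains ((i : Int) + 1) <;> simp
      have hz : ((arr.count ((i : Int) + 1) : Int)) = 0 := by
        rw [← frequencyCountMap_getD arr ((i : Int) + 1),
          PySem.Dict.getD_of_not_contains _ _ h0]
      rw [if_neg (by simp [h0]), hz]
  rw [hstep, foldl_range_set (fun (i : Nat) => (arr.count ((i : Int) + 1) : Int)) arr.length arr le_rfl]
  rw [List.drop_length, List.append_nil]

-- suffix views of B's two pointer loops, used to reason about them as list operations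
def bDropLt (t : Int) : List Int → List Int
  | [] => []
  | x :: xs => if x < t then bDropLt t xs else x :: xs

def bRun (t : Int) : List Int → Nat
  | [] => 0
  | x :: xs => if x = t then bRun t xs + 1 else 0

-- bSkip advances the pointer exactly past the elements bDropLt would discard.
lemma bSkip_drop (s : List Int) (t : Int) :
    ∀ (fuel j : Nat), s.length - j ≤ fuel → j ≤ s.length →
      s.drop (bSkip s s.length t j) = bDropLt t (s.drop j)
        ∧ j ≤ bSkip s s.length t j ∧ bSkip s s.length t j ≤ s.length := by
  intro fuel
  induction fuel with
  | zero =>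
    intro j hf hj
    have hj' : j = s.length := by omega
    rw [bSkip, dif_neg (by omega)]
    subst hj'
    simp [bDropLt]
  | succ m ih =>
    intro j hf hj
    by_cases hlt : j < s.length
    · have hdrop : s.drop j = s[j] :: s.drop (j + 1) := List.drop_eq_getElem_cons hlt
      have hget : s.getD j 0 = s[j] := List.getD_eq_getElem s 0 hlt
      by_cases hv : s.getD j 0 < t
      · rw [bSkip, dif_pos ⟨hlt, hv⟩]
        obtain ⟨h1, h2, h3⟩ := ih (j + 1) (by omega) (by omega)
        refine ⟨?_, by omega, h3⟩
        rw [h1, hdrop]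
        simp [bDropLt, hget ▸ hv]
      · rw [bSkip, dif_neg (by tauto)]
        refine ⟨?_, le_rfl, hj⟩
        rw [hdrop]
        simp [bDropLt, show ¬ s[j] < t from hget ▸ hv]
    · rw [bSkip, dif_neg (by omega)]
      have : j = s.length := by omega
      subst this
      simp [bDropLt]

-- bCount counts exactly the leading run bRun counts on the suffix.
lemma bCount_run (s : List Int) (t : Int) :
    ∀ (fuel j : Nat), s.length - j ≤ fuel → j ≤ s.length →
      bCount s s.length t j = bRun t (s.drop j) := by
  intro fuel
  induction fuel with
  | zero =>
    intro j hf hj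
    have hj' : j = s.length := by omega
    rw [bCount, dif_neg (by omega)]
    subst hj'
    simp [bRun]
  | succ m ih =>
    intro j hf hj
    by_cases hlt : j < s.length
    · have hdrop : s.drop j = s[j] :: s.drop (j + 1) := List.drop_eq_getElem_cons hlt
      have hget : s.getD j 0 = s[j] := List.getD_eq_getElem s 0 hlt
      by_cases hv : s.getD j 0 = t
      · rw [bCount, dif_pos ⟨hlt, hv⟩, ih (j + 1) (by omega) (by omega), hdrop]
        simp [bRun, hget ▸ hv]
      · rw [bCount, dif_neg (by tauto), hdrop]
        simp [bRun, show ¬ s[j] = t from hget ▸ hv]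
    · rw [bCount, dif_neg (by omega)]
      have : j = s.length := by omega
      subst this
      simp [bRun]

-- On a sorted list, the drop-smaller sweep keeps exactly the elements ≥ t.
lemma bDropLt_eq_filter (t : Int) :
    ∀ (l : List Int), l.Pairwise (· ≤ ·) → bDropLt t l = l.filter (fun e => t ≤ e) := by
  intro l
  induction l with
  | nil => intro _; rfl
  | cons x xs ih =>
    intro hp
    have hxs : xs.Pairwise (· ≤ ·) := hp.of_cons
    by_cases hx : x < t
    · rw [show bDropLt t (x :: xs) = bDropLt t xs from by simp [bDropLt, hx], ih hxs]
      simp [show ¬ t ≤ x by omega]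
    · rw [show bDropLt t (x :: xs) = x :: xs from by simp [bDropLt, hx]]
      have hall : ∀ e ∈ x :: xs, t ≤ e := by
        intro e he
        rcases List.mem_cons.mp he with h | h
        · omega
        · have := (List.pairwise_cons.mp hp).1 e h; omega
      rw [List.filter_eq_self.mpr (by intro e he; simpa using hall e he)]

-- On a sorted list all of whose elements are ≥ t, the leading run of t's is all of them.
lemma bRun_eq_count (t : Int) :
    ∀ (l : List Int), l.Pairwise (· ≤ ·) → (∀ e ∈ l, t ≤ e) → bRun t l = l.count t := by
  intro l
  induction l with
  | nil => intro _ _; rfl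
  | cons x xs ih =>
    intro hp hge
    have hxs : xs.Pairwise (· ≤ ·) := hp.of_cons
    by_cases hx : x = t
    · rw [show bRun t (x :: xs) = bRun t xs + 1 from by simp [bRun, hx],
        ih hxs (fun e he => hge e (List.mem_cons_of_mem _ he))]
      simp [hx]
    · have hgt : t < x := lt_of_le_of_ne (hge x (List.mem_cons_self)) (Ne.symm hx)
      have hz : xs.count t = 0 := by
        rw [List.count_eq_zero]
        intro hmem
        have := (List.pairwise_cons.mp hp).1 t hmem
        omega
      rw [show bRun t (x :: xs) = 0 from by simp [bRun, hx]]
      simp [hx, hz]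

-- Dropping that run leaves exactly the elements > t.
lemma drop_bRun_eq_filter (t : Int) :
    ∀ (l : List Int), l.Pairwise (· ≤ ·) → (∀ e ∈ l, t ≤ e) →
      l.drop (bRun t l) = l.filter (fun e => t + 1 ≤ e) := by
  intro l
  induction l with
  | nil => intro _ _; rfl
  | cons x xs ih =>
    intro hp hge
    have hxs : xs.Pairwise (· ≤ ·) := hp.of_cons
    by_cases hx : x = t
    · rw [show bRun t (x :: xs) = bRun t xs + 1 from by simp [bRun, hx],
        List.drop_succ_cons, ih hxs (fun e he => hge e (List.mem_cons_of_mem _ he))]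
      simp [hx]
    · have hgt : t < x := lt_of_le_of_ne (hge x (List.mem_cons_self)) (Ne.symm hx)
      rw [show bRun t (x :: xs) = 0 from by simp [bRun, hx], List.drop_zero]
      have hall : ∀ e ∈ x :: xs, t + 1 ≤ e := by
        intro e he
        rcases List.mem_cons.mp he with h | h
        · omega
        · have := (List.pairwise_cons.mp hp).1 e h; omega
      rw [List.filter_eq_self.mpr (by intro e he; simpa using hall e he)]

-- proof-only spellings of B's target list 1..n and the expected output counts
def pvTargets (t : Int) : Nat → List Int
  | 0 => []
  | k + 1 => t :: pvTargets (t + 1) k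

def pvCounts (s : List Int) (t : Int) : Nat → List Int
  | 0 => []
  | k + 1 => (s.count t : Int) :: pvCounts s (t + 1) k

lemma pvTargets_eq_map : ∀ (k : Nat) (t : Int),
    pvTargets t k = (List.range k).map (fun (j : Nat) => t + (j : Int)) := by
  intro k
  induction k with
  | zero => intro t; rfl
  | succ m ih =>
    intro t
    rw [show pvTargets t (m + 1) = t :: pvTargets (t + 1) m from rfl, ih (t + 1),
      List.range_succ_eq_map, List.map_cons, List.map_map]
    refine congrArg₂ _ (by simp) (List.map_congr_left ?_)
    intro j _
    simp [Nat.succ_eq_add_one]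
    ring

lemma pvCounts_eq_map (s : List Int) : ∀ (k : Nat) (t : Int),
    pvCounts s t k = (List.range k).map (fun (j : Nat) => (s.count (t + (j : Int)) : Int)) := by
  intro k
  induction k with
  | zero => intro t; rfl
  | succ m ih =>
    intro t
    rw [show pvCounts s t (m + 1) = (s.count t : Int) :: pvCounts s (t + 1) m from rfl,
      ih (t + 1), List.range_succ_eq_map, List.map_cons, List.map_map]
    refine congrArg₂ _ (by simp) (List.map_congr_left ?_)
    intro j _
    simp [Nat.succ_eq_add_one]
    rw [show t + ((j : Int) + 1) = t + 1 + (j : Int) from by ring]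

lemma pyRange_eq_pvTargets (t : Int) (k : Nat) :
    PySem.List.pyRange t (t + (k : Int)) 1 = pvTargets t k := by
  rw [PySem.List.pyRange_one, pvTargets_eq_map]
  have : (t + (k : Int) - t).toNat = k := by omega
  rw [this]

-- B's main loop: sweeping targets t, t+1, …, t+k-1 with a pointer j whose
-- suffix s.drop j agrees with s above t produces the multiplicities in s.
lemma b_loop_inv (s : List Int) (hs : s.Pairwise (· ≤ ·)) :
    ∀ (k : Nat) (t : Int) (j : Nat) (acc : List Int),
      j ≤ s.length →
      (s.drop j).filter (fun e => t ≤ e) = s.filter (fun e => t ≤ e) →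
      ((pvTargets t k).foldl
        (fun (st : Nat × List Int) (target : Int) =>
          let j := bSkip s s.length target st.1
          let c := bCount s s.length target j
          (j + c, st.2 ++ [(c : Int)]))
        (j, acc)).2
        = acc ++ pvCounts s t k := by
  intro k
  induction k with
  | zero => intro t j acc _ _; simp [pvTargets, pvCounts]
  | succ m ih =>
    intro t j acc hj hagree
    rw [show pvTargets t (m + 1) = t :: pvTargets (t + 1) m from rfl, List.foldl_cons]
    have hpj : (s.drop j).Pairwise (· ≤ ·) := hs.sublist (List.drop_sublist _ _)
    obtain ⟨hskip, hjle, hskiple⟩ :=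
      bSkip_drop s t (s.length - j) j le_rfl hj
    have hrest1 : s.drop (bSkip s s.length t j) = s.filter (fun e => t ≤ e) := by
      rw [hskip, bDropLt_eq_filter t _ hpj, hagree]
    have hp1 : (s.drop (bSkip s s.length t j)).Pairwise (· ≤ ·) :=
      hs.sublist (List.drop_sublist _ _)
    have hge1 : ∀ e ∈ s.drop (bSkip s s.length t j), t ≤ e := by
      intro e he; rw [hrest1] at he
      simpa using (List.mem_filter.mp he).2
    have hcount : bCount s s.length t (bSkip s s.length t j) = s.count t := by
      rw [bCount_run s t (s.length - bSkip s s.length t j) _ le_rfl hskiple,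
        bRun_eq_count t _ hp1 hge1, hrest1, List.count_filter (by simp)]
    have hc_le : bCount s s.length t (bSkip s s.length t j)
        ≤ (s.drop (bSkip s s.length t j)).length := by
      rw [bCount_run s t (s.length - bSkip s s.length t j) _ le_rfl hskiple,
        bRun_eq_count t _ hp1 hge1]
      exact List.count_le_length
    have hcr : bCount s s.length t (bSkip s s.length t j)
        = bRun t (s.drop (bSkip s s.length t j)) :=
      bCount_run s t (s.length - bSkip s s.length t j) _ le_rfl hskiple
    have hsplit : s.drop (bSkip s s.length t j + bCount s s.length t (bSkip s s.length t j))
        = (s.drop (bSkip s s.length t j)).drop (bCount s s.length t (bSkip s s.length t j)) := by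
      rw [List.drop_drop, Nat.add_comm]
    have hdrop : s.drop (bSkip s s.length t j + bCount s s.length t (bSkip s s.length t j))
        = s.filter (fun e => t + 1 ≤ e) := by
      rw [hsplit, hcr, drop_bRun_eq_filter t _ hp1 hge1, hrest1, List.filter_filter]
      apply List.filter_congr
      intro e _
      by_cases h : t + 1 ≤ e
      · simp [h, show t ≤ e by omega]
      · simp [h]
    have hnext := ih (t + 1)
      (bSkip s s.length t j + bCount s s.length t (bSkip s s.length t j))
      (acc ++ [(bCount s s.length t (bSkip s s.length t j) : Int)])
      (by have := List.length_drop (l := s) (i := bSkip s s.length t j); omega)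
      (by rw [hdrop, List.filter_filter]
          apply List.filter_congr
          intro e _
          simp)
    refine hnext.trans ?_
    rw [hcount,
      show pvCounts s t (m + 1) = (s.count t : Int) :: pvCounts s (t + 1) m from rfl]
    simp

lemma frequencyCount_alt_eq_map (arr : List Int) :
    frequencyCount_alt arr
      = (List.range arr.length).map (fun (i : Nat) => (arr.count ((i : Int) + 1) : Int)) := by
  unfold frequencyCount_alt
  have hlen : arr.length = (PySem.List.sorted arr (fun x => x) false).length :=
    (PySem.List.length_sorted arr (fun x => x) false).symm
  rw [show ((arr.length : Int) + 1) = (1 : Int) + (arr.length : Int) from by ring,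
    pyRange_eq_pvTargets 1 arr.length, hlen,
    b_loop_inv (PySem.List.sorted arr (fun x => x) false)
      (PySem.List.sorted_pairwise arr (fun x => x))
      (PySem.List.sorted arr (fun x => x) false).length 1 0 []
      (Nat.zero_le _) rfl,
    List.nil_append, pvCounts_eq_map]
  apply List.map_congr_left
  intro j _
  have hperm : (PySem.List.sorted arr (fun x => x) false).Perm arr :=
    PySem.List.sorted_perm arr (fun x => x) false
  rw [hperm.count_eq]
  norm_num [add_comm]

-- ===== VERDICT (by name: the statement is the Claim_ definition above) =====
theorem frequencyCount_spec : Claim_equal_frequencyCount := by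
  intro arr _
  unfold Spec_frequencyCount
  rw [frequencyCount_eq_map, frequencyCount_alt_eq_map]
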